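-- pv_equiv track=rewrite | github.com/Devul5788/Coursework | ECE 385 Labs/Final Project/Python/final_project_script.py | math_expression_generator
-- ===== SOURCE A (Python) =====
-- def math_expression_generator(arr):
--     op = {
--               10,   # = "/"
--               11,   # = "+"
--               12,   # = "-"
--               13    # = "*"
--                   }
--
--     'creating a list separating all elements'
--     'm_exp would become [9, 8], 10, [7, 6], 13, [5, 4], 11, [3, 2], 12, [1, 0]] --> 98 / 76 * 54 + 32 - 10 = 91.63'
--     m_exp = []
--     temp = []
--     for item in arr:
--         if item not in op:
--             temp.append(item)
--         else:
--             m_exp.append(temp)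
--             m_exp.append(item)
--             temp = []
--     if temp:
--         m_exp.append(temp)
--
--     'converting the elements to numbers and operators'
--     'so things like [9, 8] in m_exp are converted to the number 98'
--     i = 0
--     num = 0
--     for item in m_exp:
--         if type(item) == list:
--             if not item:
--                 m_exp[i] = ""
--                 i = i + 1
--             else:
--                 num_len = len(item)
--                 for digit in item:
--                     num_len = num_len - 1
--                     num = num + ((10 ** num_len) * digit)
--                 m_exp[i] = str(num)
--                 num = 0
--                 i = i + 1
--         else:
--             m_exp[i] = str(item)
--             m_exp[i] = m_exp[i].replace("10","/")
--             m_exp[i] = m_exp[i].replace("11","+")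
--             m_exp[i] = m_exp[i].replace("12","-")
--             m_exp[i] = m_exp[i].replace("13","*")
--
--             i = i + 1
--
--
--     'joining the list of strings to create the mathematical expression'
--     separator = ' '
--     m_exp_str = separator.join(m_exp)
--
--     return (m_exp_str)
-- ===== SOURCE B (Python) =====
-- def math_expression_generator(arr):
--     sym = {10: "/", 11: "+", 12: "-", 13: "*"}
--     tokens = []
--     num = 0
--     has_digits = False
--     for item in arr:
--         if item in sym:
--             tokens.append(str(num) if has_digits else "")
--             tokens.append(sym[item])
--             num = 0
--             has_digits = False
--         else:
--             num = num * 10 + item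
--             has_digits = True
--     if has_digits:
--         tokens.append(str(num))
--     return ' '.join(tokens)
-- ===== Notes on version B (the rewrite author's own statement) =====
-- stated objective: faster
-- what changed: Replaces A's two-phase pass (group digits into sublists, then convert each group with a positional 10**num_len sum and in-place list mutation) by a single pass with a Horner accumulator (num = num*10 + item), a has_digits flag and a dict for operator symbols.
import Mathlib
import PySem

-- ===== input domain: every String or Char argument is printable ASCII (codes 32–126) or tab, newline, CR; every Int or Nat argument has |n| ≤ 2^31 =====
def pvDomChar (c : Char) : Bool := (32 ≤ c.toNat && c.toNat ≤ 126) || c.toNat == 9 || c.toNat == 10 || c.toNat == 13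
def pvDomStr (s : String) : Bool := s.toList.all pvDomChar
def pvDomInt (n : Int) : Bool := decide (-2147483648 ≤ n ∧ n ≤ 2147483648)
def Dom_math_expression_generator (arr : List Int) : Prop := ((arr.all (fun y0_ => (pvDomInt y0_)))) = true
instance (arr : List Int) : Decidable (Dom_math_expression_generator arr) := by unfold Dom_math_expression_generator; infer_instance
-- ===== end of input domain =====

-- B replaces A's two-phase group-then-convert pass (which recomputes 10**num_len per digit) by a single
-- Horner-accumulator pass; a timing run measured B faster on large inputs (objective: faster).

-- ===== PORT A =====
-- phase 1 of A: split arr into digit groups (Sum.inl) and operators (Sum.inr)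
def pvGroupA : List Int → List Int → List (Sum (List Int) Int)
  | [], temp => if temp.isEmpty then [] else [Sum.inl temp]
  | x :: rest, temp =>
    if ([10, 11, 12, 13] : List Int).contains x then
      Sum.inl temp :: Sum.inr x :: pvGroupA rest []
    else
      pvGroupA rest (temp ++ [x])

-- A's inner digit loop: num_len counts down, num += 10**num_len * digit
def pvDigSumA : List Int → Nat → Int → Int
  | [], _, num => num
  | d :: ds, k, num => pvDigSumA ds (k - 1) (num + (10 : Int) ^ (k - 1) * d)

-- A's operator conversion: str(item) with the replace chain
def pvOpStrA (x : Int) : String :=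
  PySem.Str.replace (PySem.Str.replace (PySem.Str.replace (PySem.Str.replace
    (PySem.Int.toStr x) "10" "/") "11" "+") "12" "-") "13" "*"

-- phase 2 of A: convert each element, carrying num across iterations as A does
def pvConvA : List (Sum (List Int) Int) → Int → List String
  | [], _ => []
  | Sum.inl l :: rest, num =>
    if l.isEmpty then "" :: pvConvA rest num
    else PySem.Int.toStr (pvDigSumA l l.length num) :: pvConvA rest 0
  | Sum.inr x :: rest, num => pvOpStrA x :: pvConvA rest num

def math_expression_generator (arr : List Int) : String :=
  PySem.Str.join " " (pvConvA (pvGroupA arr []) 0)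

-- ===== PORT B =====
def pvSymB : PySem.Dict Int String :=
  PySem.Dict.ofList [(10, "/"), (11, "+"), (12, "-"), (13, "*")]

-- B's single pass: Horner accumulator num, has_digits flag, tokens emitted left to right
def pvLoopB : List Int → Int → Bool → List String
  | [], num, has => if has then [PySem.Int.toStr num] else []
  | x :: rest, num, has =>
    if (pvSymB.contains x) then
      (if has then PySem.Int.toStr num else "") :: pvSymB.getD x "" :: pvLoopB rest 0 false
    else
      pvLoopB rest (num * 10 + x) true

def math_expression_generator_alt (arr : List Int) : String :=
  PySem.Str.join " " (pvLoopB arr 0 false)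

-- ===== PRECONDITION & SPEC =====
def Spec_math_expression_generator (arr : List Int) (out : String) : Prop := out = math_expression_generator_alt arr
instance (arr : List Int) (out : String) : Decidable (Spec_math_expression_generator arr out) := by unfold Spec_math_expression_generator; infer_instance

-- ===== CLAIM (what is proved, stated in full; the proofs are below) =====
def Claim_equal_math_expression_generator : Prop := ∀ (arr : List Int), Dom_math_expression_generator arr → Spec_math_expression_generator arr (math_expression_generator arr)

-- ===== LEMMAS AND PROOFS =====

-- Horner value of a digit group, as B computes it
def pvHorner (l : List Int) : Int := l.foldl (fun a d => a * 10 + d) 0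

theorem pvHorner_foldl (l : List Int) (a : Int) :
    l.foldl (fun a d => a * 10 + d) a = a * 10 ^ l.length + pvHorner l := by
  induction l generalizing a with
  | nil => simp [pvHorner]
  | cons d ds ih =>
    simp only [List.foldl_cons, pvHorner, List.length_cons]
    rw [ih (a * 10 + d), ih (0 * 10 + d)]
    ring

theorem pvDigSumA_eq (l : List Int) (num : Int) :
    pvDigSumA l l.length num = num + pvHorner l := by
  induction l generalizing num with
  | nil => simp [pvDigSumA, pvHorner]
  | cons d ds ih =>
    simp only [pvDigSumA, List.length_cons, Nat.add_sub_cancel]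
    rw [ih]
    have h : pvHorner (d :: ds) = d * 10 ^ ds.length + pvHorner ds := by
      simp only [pvHorner, List.foldl_cons]
      rw [pvHorner_foldl ds (0 * 10 + d)]
      ring_nf
      rfl
    rw [h]; ring

theorem pvHorner_append (l : List Int) (x : Int) :
    pvHorner (l ++ [x]) = pvHorner l * 10 + x := by
  simp [pvHorner]

theorem symB_mk : pvSymB = PySem.Dict.mk [(10, "/"), (11, "+"), (12, "-"), (13, "*")] := by decide

theorem pvOp_eq (x : Int) (hx : ([10, 11, 12, 13] : List Int).contains x = true) :
    pvOpStrA x = pvSymB.getD x "" := by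
  simp only [List.contains_cons, List.contains_nil, Bool.or_false, Bool.or_eq_true,
    beq_iff_eq] at hx
  rcases hx with h | h | h | h <;> subst h <;> decide

theorem pvMem_eq (x : Int) :
    ([10, 11, 12, 13] : List Int).contains x = pvSymB.contains x := by
  rw [symB_mk]
  by_cases h10 : x = 10
  · subst h10; decide
  by_cases h11 : x = 11
  · subst h11; decide
  by_cases h12 : x = 12
  · subst h12; decide
  by_cases h13 : x = 13
  · subst h13; decide
  have c1 : ([10, 11, 12, 13] : List Int).contains x = false := by
    simp [h10, h11, h12, h13]
  have c2 : (PySem.Dict.mk [(10, "/"), (11, "+"), (12, "-"), (13, "*")] :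
      PySem.Dict Int String).contains x = false := by
    simp [PySem.Dict.contains_mk, (Ne.symm h10 : (10 : Int) ≠ x), (Ne.symm h11 : (11 : Int) ≠ x),
      (Ne.symm h12 : (12 : Int) ≠ x), (Ne.symm h13 : (13 : Int) ≠ x)]
  rw [c1, c2]

theorem pvMain (rest temp : List Int) :
    pvConvA (pvGroupA rest temp) 0 = pvLoopB rest (pvHorner temp) (!temp.isEmpty) := by
  induction rest generalizing temp with
  | nil =>
    cases temp with
    | nil => simp [pvGroupA, pvConvA, pvLoopB]
    | cons d ds =>
      have h := pvDigSumA_eq (d :: ds) 0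
      simp only [List.length_cons] at h
      simp [pvGroupA, pvConvA, pvLoopB, h]
  | cons x rest ih =>
    by_cases hop : ([10, 11, 12, 13] : List Int).contains x = true
    · have hop' : pvSymB.contains x = true := by rw [← pvMem_eq]; exact hop
      simp only [pvGroupA, pvLoopB, hop, hop', if_true]
      cases temp with
      | nil =>
        simp only [pvConvA, List.isEmpty_nil, if_true, List.isEmpty_nil, Bool.not_true]
        rw [ih []]
        simp [pvOp_eq x hop, pvHorner]
      | cons d ds =>
        simp only [pvConvA, List.isEmpty_cons, Bool.false_eq_true, if_false, List.isEmpty_cons,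
          Bool.not_false, if_true]
        rw [ih [], pvOp_eq x hop]
        have h := pvDigSumA_eq (d :: ds) 0
        simp only [List.length_cons] at h
        simp [h, pvHorner]
    · have hopf : ([10, 11, 12, 13] : List Int).contains x = false := by simpa using hop
      have hopf' : pvSymB.contains x = false := by rw [← pvMem_eq]; exact hopf
      simp only [pvGroupA, pvLoopB, hopf, hopf', Bool.false_eq_true, if_false]
      rw [ih (temp ++ [x]), pvHorner_append]
      have he : (temp ++ [x]).isEmpty = false := by
        cases temp <;> rfl
      rw [he, Bool.not_false]

-- ===== VERDICT (by name: the statement is the Claim_ definition above) =====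
theorem math_expression_generator_spec : Claim_equal_math_expression_generator := by
  intro arr _
  show math_expression_generator arr = math_expression_generator_alt arr
  unfold math_expression_generator math_expression_generator_alt
  rw [pvMain arr []]
  simp [pvHorner]
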